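-- pv_equiv track=rewrite | github.com/dane-9/Streamline-Workshop-Downloader | web_backend.py | _compute_queue_stats
-- ===== SOURCE A (Python) =====
-- def _compute_queue_stats(queue_items):
--     stats = {
--         "total": 0,
--         "queued": 0,
--         "downloaded": 0,
--         "failed": 0,
--         "downloading": 0,
--     }
--     for mod in queue_items:
--         stats["total"] += 1
--         status = str(mod.get("status", ""))
--         if status == "Queued":
--             stats["queued"] += 1
--         if status == "Downloaded":
--             stats["downloaded"] += 1
--         if "Failed" in status:
--             stats["failed"] += 1
--         if status == "Downloading":
--             stats["downloading"] += 1
--     return stats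
-- ===== SOURCE B (Python) =====
-- def _compute_queue_stats(queue_items):
--     statuses = [str(mod.get("status", "")) for mod in queue_items]
--     return {
--         "total": len(statuses),
--         "queued": statuses.count("Queued"),
--         "downloaded": statuses.count("Downloaded"),
--         "failed": sum(1 for s in statuses if "Failed" in s),
--         "downloading": statuses.count("Downloading"),
--     }
-- ===== Notes on version B (the rewrite author's own statement) =====
-- stated objective: idiomatic
-- what changed: B replaces A's single fused loop that increments five dict counters with staged passes: it first materialises the list of status strings, then computes total via len(), the three exact-match counts via list.count(), and failed via a generator sum, so there is no mutable stats accumulator at all.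
import Mathlib
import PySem

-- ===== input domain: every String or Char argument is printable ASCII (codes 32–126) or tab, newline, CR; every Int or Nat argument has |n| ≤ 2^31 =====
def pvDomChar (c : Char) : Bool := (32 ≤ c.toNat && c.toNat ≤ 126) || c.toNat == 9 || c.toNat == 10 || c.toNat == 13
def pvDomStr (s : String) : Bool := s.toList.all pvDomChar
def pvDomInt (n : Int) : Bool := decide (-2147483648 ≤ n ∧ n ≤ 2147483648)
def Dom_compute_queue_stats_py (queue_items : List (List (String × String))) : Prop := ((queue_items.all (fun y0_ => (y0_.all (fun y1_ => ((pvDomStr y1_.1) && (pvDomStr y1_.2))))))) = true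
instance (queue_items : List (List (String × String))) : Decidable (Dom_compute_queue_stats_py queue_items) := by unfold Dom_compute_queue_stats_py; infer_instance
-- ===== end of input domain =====

-- B replaces A's single fused counting loop with staged passes: it materialises the status list
-- once, then reads total from its length, three counts from list.count and failed from a 0/1 sum.


-- ===== PORT A =====
-- str(mod.get("status", "")) — str() is the identity on the string values admitted here
def pvStatusOf (mod : List (String × String)) : String :=
  (PySem.Dict.ofList mod).getD "status" ""

-- the body of A's for-loop (four independent ifs over the status)
def pvAStep (stats : PySem.Dict String Int) (mod : List (String × String)) : PySem.Dict String Int :=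
  let stats := stats.modify "total" 0 (· + 1)
  let status := pvStatusOf mod
  let stats := if status == "Queued" then stats.modify "queued" 0 (· + 1) else stats
  let stats := if status == "Downloaded" then stats.modify "downloaded" 0 (· + 1) else stats
  let stats := if PySem.Str.isIn "Failed" status then stats.modify "failed" 0 (· + 1) else stats
  let stats := if status == "Downloading" then stats.modify "downloading" 0 (· + 1) else stats
  stats

def compute_queue_stats_py (queue_items : List (List (String × String))) : List (String × Int) :=
  let stats : PySem.Dict String Int :=
    PySem.Dict.ofList [("total", 0), ("queued", 0), ("downloaded", 0), ("failed", 0), ("downloading", 0)]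
  (queue_items.foldl pvAStep stats).items

-- ===== PORT B =====
def compute_queue_stats_py_alt (queue_items : List (List (String × String))) : List (String × Int) :=
  let statuses := queue_items.map (fun mod => (PySem.Dict.ofList mod).getD "status" "")
  [("total", (statuses.length : Int)),
   ("queued", (PySem.List.count statuses "Queued" : Int)),
   ("downloaded", (PySem.List.count statuses "Downloaded" : Int)),
   ("failed", statuses.foldl (fun acc s => if PySem.Str.isIn "Failed" s then acc + 1 else acc) 0),
   ("downloading", (PySem.List.count statuses "Downloading" : Int))]

-- ===== PRECONDITION & SPEC =====
def Spec_compute_queue_stats_py (queue_items : List (List (String × String))) (out : List (String × Int)) : Prop := out = compute_queue_stats_py_alt queue_items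
instance (queue_items : List (List (String × String))) (out : List (String × Int)) : Decidable (Spec_compute_queue_stats_py queue_items out) := by unfold Spec_compute_queue_stats_py; infer_instance

-- ===== CLAIM (what is proved, stated in full; the proofs are below) =====
def Claim_equal_compute_queue_stats_py : Prop := ∀ (queue_items : List (List (String × String))), Dom_compute_queue_stats_py queue_items → Spec_compute_queue_stats_py queue_items (compute_queue_stats_py queue_items)

-- ===== LEMMAS AND PROOFS =====

-- the "failed" predicate
def pvFail (s : String) : Bool := PySem.Str.isIn "Failed" s

-- characterisation of one pass of A's loop over the explicit 5-key stats dict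
lemma pvA_foldl (l : List (List (String × String))) : ∀ (a b c d e : Int),
    (l.foldl pvAStep (PySem.Dict.mk
        [("total", a), ("queued", b), ("downloaded", c), ("failed", d), ("downloading", e)])).items
    = [("total", a + l.length),
       ("queued", b + ((l.map pvStatusOf).count "Queued" : Int)),
       ("downloaded", c + ((l.map pvStatusOf).count "Downloaded" : Int)),
       ("failed", d + ((l.map pvStatusOf).countP pvFail : Int)),
       ("downloading", e + ((l.map pvStatusOf).count "Downloading" : Int))] := by
  induction l with
  | nil => intro a b c d e; simp
  | cons m t ih =>
    intro a b c d e
    have hstep : pvAStep (PySem.Dict.mk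
        [("total", a), ("queued", b), ("downloaded", c), ("failed", d), ("downloading", e)]) m
      = PySem.Dict.mk
        [("total", a + 1),
         ("queued", b + (if pvStatusOf m == "Queued" then 1 else 0)),
         ("downloaded", c + (if pvStatusOf m == "Downloaded" then 1 else 0)),
         ("failed", d + (if pvFail (pvStatusOf m) then 1 else 0)),
         ("downloading", e + (if pvStatusOf m == "Downloading" then 1 else 0))] := by
      simp only [pvAStep, pvFail]
      split_ifs <;>
        simp_all [PySem.Dict.modify, PySem.Dict.insert, PySem.Dict.getD, PySem.Dict.get?,
          PySem.Dict.contains, List.find?]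
    rw [List.foldl_cons, hstep, ih]
    simp only [List.map_cons, List.count_cons, List.countP_cons, List.length_cons,
      List.cons.injEq, Prod.mk.injEq, true_and]
    refine ⟨by push_cast; omega, ?_, ?_, ?_, ?_⟩ <;>
      · try simp only [beq_iff_eq]
        push_cast
        split_ifs <;> first | omega | (simp_all <;> omega)

-- ===== VERDICT (by name: the statement is the Claim_ definition above) =====
theorem compute_queue_stats_py_spec : Claim_equal_compute_queue_stats_py := by
  intro q _
  unfold Spec_compute_queue_stats_py compute_queue_stats_py compute_queue_stats_py_alt
  have h0 : (PySem.Dict.ofList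
      [("total", (0 : Int)), ("queued", 0), ("downloaded", 0), ("failed", 0), ("downloading", 0)])
      = PySem.Dict.mk
      [("total", (0 : Int)), ("queued", 0), ("downloaded", 0), ("failed", 0), ("downloading", 0)] := by
    decide
  rw [h0, pvA_foldl q 0 0 0 0 0]
  simp only [zero_add]
  have hmap : q.map (fun mod => (PySem.Dict.ofList mod).getD "status" "") = q.map pvStatusOf := rfl
  rw [hmap, PySem.List.foldl_if_add_one]
  simp [PySem.List.count_eq]
  rfl
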